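-- pv_equiv track=rewrite | github.com/balqui/Ptf | Ptf.py | SinL2
-- ===== SOURCE A (Python) =====
-- def SinL(S,L):#Una lista dentro de otra lista
-- 	flag = True
-- 	for j in S:
-- 		if j not in L:
-- 			flag = False
-- 			break
-- 	return flag
--
-- def SinL2(S,L):#Lista S dentro de una lista de listas L
-- 	i =0
-- 	while i < len(L):
-- 		if SinL(S,L[i]):
-- 			break
-- 		else:
-- 			i+=1
-- 	if i==len(L):
-- 		return False
-- 	else:
-- 		return True
-- ===== SOURCE B (Python) =====
-- def SinL2(S, L):
--     # Candidate-pruning: keep the set of sublist indices still containing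
--     # every element of S seen so far; stop as soon as none survive.
--     candidates = set(range(len(L)))
--     for j in S:
--         candidates = {i for i in candidates if j in L[i]}
--         if not candidates:
--             return False
--     return bool(candidates)
-- ===== Notes on version B (the rewrite author's own statement) =====
-- stated objective: alternative
-- what changed: Instead of scanning each sublist in turn with an index loop and an inner membership loop, B iterates over S once, maintaining a pruned set of surviving sublist indices and stopping early when it becomes empty.
import Mathlib
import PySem

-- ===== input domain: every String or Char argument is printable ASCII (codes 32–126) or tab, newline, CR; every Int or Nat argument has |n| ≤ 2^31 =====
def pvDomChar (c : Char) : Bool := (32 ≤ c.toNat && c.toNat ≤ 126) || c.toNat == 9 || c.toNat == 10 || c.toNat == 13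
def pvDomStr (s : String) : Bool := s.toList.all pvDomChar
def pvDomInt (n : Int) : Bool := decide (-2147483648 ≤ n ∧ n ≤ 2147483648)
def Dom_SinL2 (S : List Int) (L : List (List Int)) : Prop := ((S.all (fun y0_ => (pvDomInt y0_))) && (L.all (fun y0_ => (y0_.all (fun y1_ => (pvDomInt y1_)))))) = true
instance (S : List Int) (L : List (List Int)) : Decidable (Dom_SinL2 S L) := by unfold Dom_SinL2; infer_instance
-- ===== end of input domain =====

-- B replaces A's index loop over L (with an inner full membership scan per sublist) by a
-- single pass over S that prunes a set of surviving sublist indices (objective: alternative).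

-- ===== PORT A =====
-- SinL: flag = True; for j in S: if j not in L: flag = False; break; return flag
def SinL (S : List Int) (L : List Int) : Bool :=
  match S with
  | [] => true
  | j :: rest => if !(L.contains j) then false else SinL rest L

-- while i < len(L): if SinL(S, L[i]): break else i += 1 ; then return i != len(L)
def SinL2go (S : List Int) (L : List (List Int)) (i : Nat) : Bool :=
  if h : i < L.length then
    if SinL S L[i] then true else SinL2go S L (i + 1)
  else false
termination_by L.length - i

def SinL2 (S : List Int) (L : List (List Int)) : Bool := SinL2go S L 0

-- ===== PORT B =====
-- for j in S: candidates = {i for i in candidates if j in L[i]}; if not candidates: return False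
-- every i in candidates comes from range(len(L)), so L[i] is the exact lookup L.getD i []
def SinL2altGo (L : List (List Int)) (S : List Int) (cands : PySem.Set Nat) : Bool :=
  match S with
  | [] => !cands.isEmpty
  | j :: rest =>
    let c' : PySem.Set Nat := cands.filter (fun i => (L.getD i []).contains j)
    if c'.isEmpty then false else SinL2altGo L rest c'

def SinL2_alt (S : List Int) (L : List (List Int)) : Bool :=
  SinL2altGo L S (PySem.Set.ofList (List.range L.length))

-- ===== PRECONDITION & SPEC =====
def Spec_SinL2 (S : List Int) (L : List (List Int)) (out : Bool) : Prop := out = SinL2_alt S L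
instance (S : List Int) (L : List (List Int)) (out : Bool) : Decidable (Spec_SinL2 S L out) := by unfold Spec_SinL2; infer_instance

-- ===== CLAIM (what is proved, stated in full; the proofs are below) =====
def Claim_equal_SinL2 : Prop := ∀ (S : List Int) (L : List (List Int)), Dom_SinL2 S L → Spec_SinL2 S L (SinL2 S L)

-- ===== LEMMAS AND PROOFS =====

theorem sinl_eq_all (S L : List Int) : SinL S L = S.all (fun j => L.contains j) := by
  induction S with
  | nil => rfl
  | cons j rest ih =>
    simp only [SinL, List.all_cons, ih]
    cases h : L.contains j <;> simp

theorem sinl2go_iff (S : List Int) (L : List (List Int)) (i : Nat) :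
    SinL2go S L i = true ↔ ∃ k, i ≤ k ∧ ∃ h : k < L.length, SinL S L[k] = true := by
  unfold SinL2go
  split
  · rename_i h
    split
    · rename_i hs
      simp only [true_iff]
      exact ⟨i, le_refl i, h, hs⟩
    · rename_i hs
      rw [sinl2go_iff S L (i + 1)]
      constructor
      · rintro ⟨k, hk, hlt, hsk⟩
        exact ⟨k, Nat.le_of_succ_le hk, hlt, hsk⟩
      · rintro ⟨k, hk, hlt, hsk⟩
        refine ⟨k, ?_, hlt, hsk⟩
        rcases Nat.lt_or_ge i k with hik | hik
        · exact hik
        · exfalso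
          have : i = k := Nat.le_antisymm hk hik
          subst this
          exact hs hsk
  · rename_i h
    simp only [Bool.false_eq_true, false_iff]
    rintro ⟨k, hk, hlt, _⟩
    exact h (Nat.lt_of_le_of_lt hk hlt)
termination_by L.length - i

theorem any_filter' {α : Type} (l : List α) (p q : α → Bool) :
    (l.filter p).any q = l.any (fun x => p x && q x) := by
  induction l with
  | nil => rfl
  | cons x xs ih =>
    simp only [List.filter_cons, List.any_cons]
    cases h : p x <;> simp [List.any_cons, ih]

theorem altGo_eq_any (L : List (List Int)) (S : List Int) (c : List Nat) :
    SinL2altGo L S c = c.any (fun i => S.all (fun j => (L.getD i []).contains j)) := by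
  induction S generalizing c with
  | nil =>
    cases c <;> simp [SinL2altGo]
  | cons j rest ih =>
    simp only [SinL2altGo]
    split
    · rename_i hemp
      have hnil : (c.filter (fun i => (L.getD i []).contains j)) = [] :=
        List.isEmpty_iff.mp hemp
      rw [eq_comm, ← Bool.not_eq_true]
      intro hany
      rw [List.any_eq_true] at hany
      obtain ⟨i, hi, hp⟩ := hany
      simp only [List.all_cons, Bool.and_eq_true] at hp
      have hmemf : i ∈ c.filter (fun i => (L.getD i []).contains j) :=
        List.mem_filter.mpr ⟨hi, hp.1⟩
      rw [hnil] at hmemf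
      simp at hmemf
    · rw [ih, any_filter']
      simp [List.all_cons]

theorem alt_iff (S : List Int) (L : List (List Int)) :
    SinL2_alt S L = true ↔ ∃ k, ∃ h : k < L.length, S.all (fun j => L[k].contains j) = true := by
  unfold SinL2_alt
  rw [altGo_eq_any, List.any_eq_true]
  constructor
  · rintro ⟨i, hi, hp⟩
    have hmem : i ∈ List.range L.length := (PySem.Set.mem_ofList _ _).mp hi
    have hlt : i < L.length := List.mem_range.mp hmem
    refine ⟨i, hlt, ?_⟩
    rwa [List.getD_eq_getElem _ _ hlt] at hp
  · rintro ⟨k, hlt, hp⟩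
    refine ⟨k, (PySem.Set.mem_ofList _ _).mpr (List.mem_range.mpr hlt), ?_⟩
    rwa [List.getD_eq_getElem _ _ hlt]

-- ===== VERDICT (by name: the statement is the Claim_ definition above) =====
theorem SinL2_spec : Claim_equal_SinL2 := by
  intro S L _
  unfold Spec_SinL2
  rw [Bool.eq_iff_iff]
  unfold SinL2
  rw [sinl2go_iff, alt_iff]
  constructor
  · rintro ⟨k, _, hlt, hs⟩
    rw [sinl_eq_all] at hs
    exact ⟨k, hlt, hs⟩
  · rintro ⟨k, hlt, hs⟩
    exact ⟨k, Nat.zero_le k, hlt, (sinl_eq_all S L[k]).trans hs⟩
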